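-- pv_equiv track=rewrite | github.com/cjohnson7777/algorithm_practice | Graphs/largest_component.py | countSize
-- ===== SOURCE A (Python) =====
-- def countSize(graph, node, visited):
--     if node in visited:
--         return 0
--
--     visited.add(node)
--
--     size = 1
--
--     for neighbor in graph[node]:
--        size += countSize(graph, neighbor, visited)
--
--     return size
-- ===== SOURCE B (Python) =====
-- def countSize(graph, node, visited):
--     # Iterative DFS with an explicit stack; membership is tested at pop time,
--     # so duplicates pushed from cycles are not double-counted. Mutates
--     # `visited` exactly like the recursive version.
--     size = 0
--     stack = [node]
--     while stack:
--         n = stack.pop()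
--         if n in visited:
--             continue
--         visited.add(n)
--         size += 1
--         stack.extend(reversed(graph[n]))
--     return size
-- ===== Notes on version B (the rewrite author's own statement) =====
-- stated objective: idiomatic
-- what changed: The recursive DFS is replaced by an iterative explicit-stack DFS (worklist loop, membership tested at pop time), which also cannot hit Python's recursion limit.
import Mathlib
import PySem

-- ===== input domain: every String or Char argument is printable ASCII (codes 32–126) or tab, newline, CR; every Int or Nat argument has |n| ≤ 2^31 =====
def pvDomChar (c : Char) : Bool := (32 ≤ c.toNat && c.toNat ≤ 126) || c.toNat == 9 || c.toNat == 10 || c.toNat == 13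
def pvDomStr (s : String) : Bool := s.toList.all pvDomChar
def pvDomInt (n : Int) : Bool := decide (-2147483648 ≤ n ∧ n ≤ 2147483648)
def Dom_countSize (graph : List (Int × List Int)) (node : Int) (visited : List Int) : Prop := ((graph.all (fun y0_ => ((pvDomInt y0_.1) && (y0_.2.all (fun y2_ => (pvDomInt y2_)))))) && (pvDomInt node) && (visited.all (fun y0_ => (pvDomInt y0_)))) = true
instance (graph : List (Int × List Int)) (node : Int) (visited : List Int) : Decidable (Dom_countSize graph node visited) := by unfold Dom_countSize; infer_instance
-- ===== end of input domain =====

-- B replaces the recursion by an iterative explicit-stack DFS (membership tested at pop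
-- time); same return value, and both versions mutate `visited` identically in Python.

-- number of graph keys not yet visited: the common termination measure of both ports
def pvFresh (graph : List (Int × List Int)) (visited : List Int) : Nat :=
  ((graph.map Prod.fst).filter (fun k => !visited.contains k)).length

theorem pvFresh_append_le (graph : List (Int × List Int)) (v w : List Int) :
    pvFresh graph (v ++ w) ≤ pvFresh graph v := by
  unfold pvFresh
  simp only [← List.countP_eq_length_filter]
  exact List.countP_mono_left (by
    intro a _ h
    simp only [List.contains_append, Bool.not_eq_true', Bool.or_eq_false_iff] at h ⊢
    exact h.1)

theorem pvCountP_lt {α : Type} (L : List α) (p q : α → Bool) (n : α)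
    (hmono : ∀ a, q a = true → p a = true) (hn : n ∈ L) (hp : p n = true) (hq : q n = false) :
    L.countP q < L.countP p := by
  induction L with
  | nil => cases hn
  | cons x xs ih =>
    have hmono' : List.countP q xs ≤ List.countP p xs :=
      List.countP_mono_left (fun a _ h => hmono a h)
    rcases List.mem_cons.mp hn with rfl | hx
    · simp [List.countP_cons, hp, hq]
      omega
    · have := ih hx
      simp only [List.countP_cons]
      have h2 : (if q x = true then 1 else 0) ≤ (if p x = true then 1 else 0) := by
        by_cases hqx : q x = true
        · simp [hqx, hmono x hqx]
        · simp [hqx]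
      omega

theorem pvFresh_lt (graph : List (Int × List Int)) (v : List Int) (n : Int)
    (hk : n ∈ graph.map Prod.fst) (hv : v.contains n = false) :
    pvFresh graph (v ++ [n]) < pvFresh graph v := by
  unfold pvFresh
  simp only [← List.countP_eq_length_filter]
  refine pvCountP_lt _ _ _ n ?_ hk ?_ ?_
  · intro a h
    simp only [List.contains_append, Bool.not_eq_true', Bool.or_eq_false_iff] at h
    simpa using h.1
  · simpa using hv
  · simp [List.contains_append, hv]

theorem pvLookup_mem_keys (graph : List (Int × List Int)) (n : Int) (adj : List Int)
    (h : List.lookup n graph = some adj) : n ∈ graph.map Prod.fst := by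
  induction graph with
  | nil => simp [List.lookup] at h
  | cons p rest ih =>
    cases hb : n == p.1 with
    | true =>
      simp only [List.map_cons, List.mem_cons]
      exact Or.inl (eq_of_beq hb)
    | false =>
      simp only [List.lookup, hb] at h
      exact List.mem_cons_of_mem _ (ih h)

theorem pvSet_add_not_mem (v : List Int) (n : Int) (hv : v.contains n = false) :
    PySem.Set.add v n = v ++ [n] := by
  apply PySem.Set.add_of_not_mem
  simpa using hv

theorem pvPop_some (stack st : List Int) (n : Int)
    (h : PySem.List.pop? stack (-1) = some (n, st)) : stack = st ++ [n] := by
  induction stack using List.reverseRecOn with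
  | nil => exact absurd h (by simp [PySem.List.pop?, PySem.List.pyIdx?])
  | append_singleton ys y _ =>
    rw [PySem.List.pop?_last] at h
    cases h; rfl

-- ===== PORT A =====
-- A is a recursive DFS mutating the shared set `visited`; the port threads that state:
-- countSizeGo returns (size, delta) where delta lists the nodes the call newly added to
-- visited (so the set after the call is visited ++ delta), and countSizeGoList is A's
-- `for neighbor in graph[node]` loop.
mutual
def countSizeGo (graph : List (Int × List Int)) (node : Int) (visited : List Int) : Int × List Int :=
  if hv : visited.contains node then (0, [])
  else
    match h : List.lookup node graph with
    | none => (1, [node])       -- Python raises KeyError at graph[node]; excluded by Pre_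
    | some adj =>
      let r := countSizeGoList graph adj (PySem.Set.add visited node) 1
      (r.1, node :: r.2)
termination_by (pvFresh graph visited, 0)
decreasing_by
  apply Prod.Lex.left
  rw [pvSet_add_not_mem _ _ (by simpa using hv)]
  exact pvFresh_lt _ _ _ (pvLookup_mem_keys _ _ _ h) (by simpa using hv)

def countSizeGoList (graph : List (Int × List Int)) (ns : List Int) (visited : List Int) (size : Int) : Int × List Int :=
  match ns with
  | [] => (size, [])
  | nb :: rest =>
    let r := countSizeGo graph nb visited
    let r2 := countSizeGoList graph rest (visited ++ r.2) (size + r.1)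
    (r2.1, r.2 ++ r2.2)
termination_by (pvFresh graph visited, ns.length + 1)
decreasing_by
  · exact Prod.Lex.right _ (by simp)
  · rcases Nat.lt_or_ge (pvFresh graph (visited ++ r.2)) (pvFresh graph visited) with hlt | hge
    · exact Prod.Lex.left _ _ hlt
    · have heq : pvFresh graph (visited ++ r.2) = pvFresh graph visited :=
        Nat.le_antisymm (pvFresh_append_le graph visited r.2) hge
      rw [heq]
      exact Prod.Lex.right _ (by simp)
end

def countSize (graph : List (Int × List Int)) (node : Int) (visited : List Int) : Int :=
  (countSizeGo graph node visited).1

-- ===== PORT B =====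
-- B's while loop over (stack, visited, size); stack.pop() = PySem.List.pop? stack (-1)
def countSizeLoop (graph : List (Int × List Int)) (stack : List Int) (visited : List Int) (size : Int) : Int :=
  match h : PySem.List.pop? stack (-1) with
  | none => size                          -- `while stack:` exits
  | some (n, st) =>
    if hv : visited.contains n then countSizeLoop graph st visited size
    else
      match h2 : List.lookup n graph with
      | none => countSizeLoop graph st (PySem.Set.add visited n) (size + 1)
          -- Python raises KeyError at graph[n]; excluded by Pre_
      | some adj => countSizeLoop graph (st ++ adj.reverse) (PySem.Set.add visited n) (size + 1)
termination_by (pvFresh graph visited, stack.length)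
decreasing_by
  · apply Prod.Lex.right
    have := pvPop_some _ _ _ h
    subst this
    simp
  · have := pvPop_some _ _ _ h
    subst this
    rw [pvSet_add_not_mem _ _ (by simpa using hv)]
    rcases Nat.lt_or_ge (pvFresh graph (visited ++ [n])) (pvFresh graph visited) with hlt | hge
    · exact Prod.Lex.left _ _ hlt
    · have heq : pvFresh graph (visited ++ [n]) = pvFresh graph visited :=
        Nat.le_antisymm (pvFresh_append_le graph visited [n]) hge
      rw [heq]
      exact Prod.Lex.right _ (by simp)
  · apply Prod.Lex.left
    rw [pvSet_add_not_mem _ _ (by simpa using hv)]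
    exact pvFresh_lt _ _ _ (pvLookup_mem_keys _ _ _ h2) (by simpa using hv)

def countSize_alt (graph : List (Int × List Int)) (node : Int) (visited : List Int) : Int :=
  countSizeLoop graph [node] visited 0

-- ===== PRECONDITION & SPEC =====
-- helpers for Pre_: the set of nodes A's DFS reaches (closure of {node} under the edges of
-- non-visited nodes); iterating graph.length + 1 parallel expansion rounds reaches a fixpoint
def pvExpand (graph : List (Int × List Int)) (visited : List Int) (R : List Int) : List Int :=
  R.foldl (fun acc m =>
    if visited.contains m then acc
    else PySem.Set.update acc ((List.lookup m graph).getD [])) R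

def pvReach (graph : List (Int × List Int)) (visited : List Int) (node : Int) : List Int :=
  Nat.rec ([node] : List Int) (fun _ R => pvExpand graph visited R) (graph.length + 1)

-- Pre_: A raises KeyError exactly when some node its DFS reaches is neither already
-- visited nor a key of graph; Pre_ excludes exactly those inputs
def Pre_countSize (graph : List (Int × List Int)) (node : Int) (visited : List Int) : Prop :=
  ∀ m ∈ pvReach graph visited node,
    visited.contains m = true ∨ (graph.map Prod.fst).contains m = true
instance (graph : List (Int × List Int)) (node : Int) (visited : List Int) : Decidable (Pre_countSize graph node visited) := by unfold Pre_countSize; infer_instance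

def pvWitness_countSize : (List (Int × List Int)) × Int × List Int :=
  ([(0, [1, 2]), (1, [0]), (2, [])], 0, [5])

def Spec_countSize (graph : List (Int × List Int)) (node : Int) (visited : List Int) (out : Int) : Prop := out = countSize_alt graph node visited
instance (graph : List (Int × List Int)) (node : Int) (visited : List Int) (out : Int) : Decidable (Spec_countSize graph node visited out) := by unfold Spec_countSize; infer_instance

-- ===== CLAIM (what is proved, stated in full; the proofs are below) =====
def Claim_equal_countSize : Prop := ∀ (graph : List (Int × List Int)) (node : Int) (visited : List Int), Dom_countSize graph node visited → Pre_countSize graph node visited → Spec_countSize graph node visited (countSize graph node visited)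

-- ===== LEMMAS AND PROOFS =====

theorem pvPop_none (stack : List Int) (h : PySem.List.pop? stack (-1) = none) : stack = [] := by
  cases stack with
  | nil => rfl
  | cons x xs => simp [PySem.List.pop?, PySem.List.pyIdx?] at h

-- step equations for the two ports (their dependent matches are unfolded here once)
theorem go_visited (g : List (Int × List Int)) (n : Int) (v : List Int)
    (hv : v.contains n = true) : countSizeGo g n v = (0, []) := by
  rw [countSizeGo, dif_pos hv]

theorem go_none (g : List (Int × List Int)) (n : Int) (v : List Int)
    (hv : v.contains n = false) (h : List.lookup n g = none) :
    countSizeGo g n v = (1, [n]) := by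
  rw [countSizeGo, dif_neg (by simpa using hv)]
  split
  · rfl
  · rename_i adj h2
    rw [h] at h2
    cases h2

theorem go_some (g : List (Int × List Int)) (n : Int) (v : List Int) (adj : List Int)
    (hv : v.contains n = false) (h : List.lookup n g = some adj) :
    countSizeGo g n v =
      ((countSizeGoList g adj (PySem.Set.add v n) 1).1,
        n :: (countSizeGoList g adj (PySem.Set.add v n) 1).2) := by
  rw [countSizeGo, dif_neg (by simpa using hv)]
  split
  · rename_i h2
    rw [h] at h2
    cases h2
  · rename_i adj' h2
    rw [h] at h2
    cases h2
    rfl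

theorem goList_nil (g : List (Int × List Int)) (v : List Int) (acc : Int) :
    countSizeGoList g [] v acc = (acc, []) := by
  rw [countSizeGoList]

theorem goList_cons (g : List (Int × List Int)) (nb : Int) (rest v : List Int) (acc : Int) :
    countSizeGoList g (nb :: rest) v acc =
      ((countSizeGoList g rest (v ++ (countSizeGo g nb v).2) (acc + (countSizeGo g nb v).1)).1,
        (countSizeGo g nb v).2 ++
        (countSizeGoList g rest (v ++ (countSizeGo g nb v).2) (acc + (countSizeGo g nb v).1)).2) := by
  rw [countSizeGoList]

theorem loop_nil (g : List (Int × List Int)) (v : List Int) (size : Int) :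
    countSizeLoop g [] v size = size := by
  rw [countSizeLoop]
  split
  · rfl
  · rename_i n st heq
    simp [PySem.List.pop?, PySem.List.pyIdx?] at heq

theorem loop_pop_visited (g : List (Int × List Int)) (st : List Int) (n : Int) (v : List Int)
    (size : Int) (hv : v.contains n = true) :
    countSizeLoop g (st ++ [n]) v size = countSizeLoop g st v size := by
  rw [countSizeLoop]
  split
  · rename_i heq
    simp [PySem.List.pop?_last] at heq
  · rename_i n1 st1 heq
    rw [PySem.List.pop?_last] at heq
    cases heq
    rw [dif_pos hv]

theorem loop_pop_new_none (g : List (Int × List Int)) (st : List Int) (n : Int) (v : List Int)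
    (size : Int) (hv : v.contains n = false) (h2 : List.lookup n g = none) :
    countSizeLoop g (st ++ [n]) v size =
      countSizeLoop g st (PySem.Set.add v n) (size + 1) := by
  rw [countSizeLoop]
  split
  · rename_i heq
    simp [PySem.List.pop?_last] at heq
  · rename_i n1 st1 heq
    rw [PySem.List.pop?_last] at heq
    cases heq
    rw [dif_neg (by simpa using hv)]
    split
    · rfl
    · rename_i adj h2'
      rw [h2] at h2'
      cases h2'

theorem loop_pop_new_some (g : List (Int × List Int)) (st : List Int) (n : Int) (v : List Int)
    (size : Int) (adj : List Int) (hv : v.contains n = false) (h2 : List.lookup n g = some adj) :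
    countSizeLoop g (st ++ [n]) v size =
      countSizeLoop g (st ++ adj.reverse) (PySem.Set.add v n) (size + 1) := by
  rw [countSizeLoop]
  split
  · rename_i heq
    simp [PySem.List.pop?_last] at heq
  · rename_i n1 st1 heq
    rw [PySem.List.pop?_last] at heq
    cases heq
    rw [dif_neg (by simpa using hv)]
    split
    · rename_i h2'
      rw [h2] at h2'
      cases h2'
    · rename_i adj' h2'
      rw [h2] at h2'
      cases h2'
      rfl

theorem goList_shift (graph : List (Int × List Int)) (ns : List Int) :
    ∀ (v : List Int) (acc : Int),
      countSizeGoList graph ns v acc =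
        ((countSizeGoList graph ns v 0).1 + acc, (countSizeGoList graph ns v 0).2) := by
  induction ns with
  | nil => intro v acc; simp [goList_nil]
  | cons nb rest ih =>
    intro v acc
    rw [goList_cons, goList_cons,
        ih (v ++ (countSizeGo graph nb v).2) (acc + (countSizeGo graph nb v).1),
        ih (v ++ (countSizeGo graph nb v).2) (0 + (countSizeGo graph nb v).1)]
    simp only [Prod.mk.injEq]
    refine ⟨by omega, trivial⟩

theorem goList_append (graph : List (Int × List Int)) (xs ys : List Int) :
    ∀ (v : List Int) (acc : Int),
      countSizeGoList graph (xs ++ ys) v acc =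
        ((countSizeGoList graph ys (v ++ (countSizeGoList graph xs v acc).2) (countSizeGoList graph xs v acc).1).1,
         (countSizeGoList graph xs v acc).2 ++
         (countSizeGoList graph ys (v ++ (countSizeGoList graph xs v acc).2) (countSizeGoList graph xs v acc).1).2) := by
  induction xs with
  | nil => intro v acc; simp [goList_nil]
  | cons x xs' ih =>
    intro v acc
    rw [List.cons_append, goList_cons, goList_cons,
        ih (v ++ (countSizeGo graph x v).2) (acc + (countSizeGo graph x v).1)]
    simp [List.append_assoc]

theorem loop_eq_goList (graph : List (Int × List Int)) (stack visited : List Int) (size : Int) :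
    countSizeLoop graph stack visited size =
      (countSizeGoList graph stack.reverse visited size).1 := by
  induction stack, visited, size using countSizeLoop.induct graph with
  | case1 stack v size h =>
    have hs := pvPop_none _ h
    subst hs
    rw [loop_nil]
    simp [goList_nil]
  | case2 stack v size n st h hv ih =>
    have hs := pvPop_some _ _ _ h
    subst hs
    rw [loop_pop_visited _ _ _ _ _ hv, ih]
    simp [List.reverse_append, goList_cons, go_visited _ _ _ hv]
  | case3 stack v size n st h hv h2 ih =>
    have hv' : v.contains n = false := by simpa using hv
    have hs := pvPop_some _ _ _ h
    subst hs
    rw [loop_pop_new_none _ _ _ _ _ hv' h2, ih]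
    simp [List.reverse_append, goList_cons, go_none _ _ _ hv' h2,
      pvSet_add_not_mem _ _ hv']
  | case4 stack v size n st h hv adj h2 ih =>
    have hv' : v.contains n = false := by simpa using hv
    have hs := pvPop_some _ _ _ h
    subst hs
    rw [loop_pop_new_some _ _ _ _ _ _ hv' h2, ih,
        pvSet_add_not_mem _ _ hv']
    simp only [List.reverse_append, List.reverse_reverse, List.reverse_cons,
      List.reverse_nil, List.nil_append, List.singleton_append]
    rw [goList_append graph adj st.reverse (v ++ [n]) (size + 1), goList_cons,
        go_some _ _ _ _ hv' h2, pvSet_add_not_mem _ _ hv']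
    simp only []
    rw [goList_shift graph adj (v ++ [n]) (size + 1),
        goList_shift graph adj (v ++ [n]) 1]
    have e1 : (v ++ [n]) ++ (countSizeGoList graph adj (v ++ [n]) 0).2
        = v ++ n :: (countSizeGoList graph adj (v ++ [n]) 0).2 := by simp
    have e2 : (countSizeGoList graph adj (v ++ [n]) 0).1 + (size + 1)
        = size + ((countSizeGoList graph adj (v ++ [n]) 0).1 + 1) := by ring
    rw [e1, e2]

-- ===== VERDICT (by name: the statement is the Claim_ definition above) =====
theorem countSize_spec : Claim_equal_countSize := by
  intro graph node visited _ _
  unfold Spec_countSize countSize countSize_alt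
  rw [show ([node] : List Int) = [] ++ [node] by rfl] at *
  rw [loop_eq_goList]
  simp [goList_cons, goList_nil]
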